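-- pv_equiv track=rewrite | github.com/ONSvisual/dot-density-data | python-test/recompute-dotcounts.py | make_dot_zooms
-- ===== SOURCE A (Python) =====
-- ZOOMS = [
--   50000, 20000, 10000,
--   5000, 2000, 1000,
--   500, 200, 100,
--   50, 20, 10,
--   5, 2, 1
-- ]
--
-- def make_dot_zooms(dots):
--   dot_zooms = [-1] * len(dots)
--   for zoom_level, people_per_dot in enumerate(ZOOMS):
--     for i in range(0, len(dots), people_per_dot):
--       if dot_zooms[i] != -1: continue
--       if (
--         people_per_dot in [2, 20, 200, 2000, 20000] and
--         i % (people_per_dot * 5) == people_per_dot * 3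
--       ):
--         continue
--       dot_zooms[i] = zoom_level
--   return dot_zooms
-- ===== SOURCE B (Python) =====
-- ZOOMS = [
--   50000, 20000, 10000,
--   5000, 2000, 1000,
--   500, 200, 100,
--   50, 20, 10,
--   5, 2, 1
-- ]
--
-- def make_dot_zooms(dots):
--   dot_zooms = []
--   for i in range(len(dots)):
--     z = -1
--     for zoom_level, people_per_dot in enumerate(ZOOMS):
--       if i % people_per_dot != 0:
--         continue
--       if (
--         people_per_dot in [2, 20, 200, 2000, 20000] and
--         i % (people_per_dot * 5) == people_per_dot * 3
--       ):
--         continue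
--       z = zoom_level
--       break
--     dot_zooms.append(z)
--   return dot_zooms
-- ===== Notes on version B (the rewrite author's own statement) =====
-- stated objective: simpler
-- what changed: A fills a mutable dot_zooms array zoom-level by zoom-level with stride loops and a first-write-wins guard; B loops over indices and, per index, scans ZOOMS for the first applicable level and breaks, building the result directly with no mutable fill state.
import Mathlib
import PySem

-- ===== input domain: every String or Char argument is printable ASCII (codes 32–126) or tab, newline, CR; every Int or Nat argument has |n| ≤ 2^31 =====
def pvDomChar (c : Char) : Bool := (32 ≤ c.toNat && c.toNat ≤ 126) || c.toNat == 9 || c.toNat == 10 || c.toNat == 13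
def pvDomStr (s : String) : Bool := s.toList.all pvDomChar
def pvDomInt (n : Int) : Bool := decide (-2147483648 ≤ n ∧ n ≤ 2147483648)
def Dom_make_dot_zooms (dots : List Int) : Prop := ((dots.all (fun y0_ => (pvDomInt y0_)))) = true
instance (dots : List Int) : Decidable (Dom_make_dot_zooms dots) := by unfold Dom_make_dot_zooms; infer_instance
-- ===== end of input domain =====

-- B inverts A's zoom-outer/stride-inner fill (first-write-wins over a mutable array) into an
-- index-outer/zoom-inner first-match scan with break; objective: simpler (no mutable fill state).

-- ===== PORT A =====
def ZOOMS : List Int := [50000, 20000, 10000, 5000, 2000, 1000, 500, 200, 100, 50, 20, 10, 5, 2, 1]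

-- the special skip condition, shared verbatim by both Python versions
def dotSkip (ppd i : Int) : Bool :=
  decide (ppd ∈ ([2, 20, 200, 2000, 20000] : List Int)) &&
  decide (PySem.Int.mod i (ppd * 5) = ppd * 3)

def make_dot_zooms (dots : List Int) : List Int :=
  (PySem.List.enumerate ZOOMS).foldl
    (fun dz p =>
      (PySem.List.pyRange 0 (dots.length : Int) p.2).foldl
        (fun dz i =>
          if PySem.List.pyGetD dz i 0 ≠ -1 then dz
          else if dotSkip p.2 i then dz
          else dz.set i.toNat p.1)
        dz)
    (List.replicate dots.length (-1))

-- ===== PORT B =====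
-- B's inner for-with-break: first zoom level whose stride divides i and is not skipped
def findZoom : List (Int × Int) → Int → Int
  | [], _ => -1
  | (zl, ppd) :: rest, i =>
    if PySem.Int.mod i ppd ≠ 0 then findZoom rest i
    else if dotSkip ppd i then findZoom rest i
    else zl

def make_dot_zooms_alt (dots : List Int) : List Int :=
  (PySem.List.pyRange 0 (dots.length : Int) 1).foldl
    (fun res i => res ++ [findZoom (PySem.List.enumerate ZOOMS) i]) []

-- ===== PRECONDITION & SPEC =====
def Spec_make_dot_zooms (dots : List Int) (out : List Int) : Prop := out = make_dot_zooms_alt dots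
instance (dots : List Int) (out : List Int) : Decidable (Spec_make_dot_zooms dots out) := by unfold Spec_make_dot_zooms; infer_instance

-- ===== CLAIM (what is proved, stated in full; the proofs are below) =====
def Claim_equal_make_dot_zooms : Prop := ∀ (dots : List Int), Dom_make_dot_zooms dots → Spec_make_dot_zooms dots (make_dot_zooms dots)

-- ===== LEMMAS AND PROOFS =====

-- A's inner stride loop preserves the list length
lemma fill_length (zl ppd : Int) (L : List Int) (dz : List Int) :
    (L.foldl (fun dz i =>
        if PySem.List.pyGetD dz i 0 ≠ -1 then dz
        else if dotSkip ppd i then dz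
        else dz.set i.toNat zl) dz).length = dz.length := by
  induction L generalizing dz with
  | nil => rfl
  | cons i L ih =>
    simp only [List.foldl_cons]; rw [ih]
    split_ifs <;> simp

-- characterisation of A's inner stride loop at index j (L: the visited indices, all nonneg)
lemma fill_get (zl ppd : Int) (hzl : zl ≠ -1) (L : List Int) (hL : ∀ i ∈ L, 0 ≤ i)
    (dz : List Int) (j : Nat) (hj : j < dz.length) :
    (L.foldl (fun dz i =>
        if PySem.List.pyGetD dz i 0 ≠ -1 then dz
        else if dotSkip ppd i then dz
        else dz.set i.toNat zl) dz)[j]? =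
      if (j : Int) ∈ L ∧ dz[j]? = some (-1) ∧ dotSkip ppd (j : Int) = false
      then some zl else dz[j]? := by
  induction L generalizing dz with
  | nil => simp
  | cons i L ih =>
    have hi0 : 0 ≤ i := hL i (by simp)
    have hL' : ∀ i ∈ L, 0 ≤ i := fun x hx => hL x (by simp [hx])
    simp only [List.foldl_cons]
    by_cases hij : i = (j : Int)
    · subst hij
      have hlt : (j : Int) < (dz.length : Int) := by exact_mod_cast hj
      have hget : PySem.List.pyGetD dz (j : Int) 0 = dz[j] := by
        rw [PySem.List.pyGetD_eq_getElem dz 0 hi0 hlt]; simp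
      have hsome : dz[j]? = some dz[j] := List.getElem?_eq_getElem hj
      by_cases h1 : dz[j] = -1
      · by_cases hs : dotSkip ppd (j : Int) = true
        · have hstep : (if PySem.List.pyGetD dz (j : Int) 0 ≠ -1 then dz
              else if dotSkip ppd (j : Int) then dz
              else dz.set ((j : Int)).toNat zl) = dz := by
            rw [hget]; simp [h1, hs]
          rw [hstep, ih hL' dz hj]
          simp [hsome, h1, hs]
        · have hstep : (if PySem.List.pyGetD dz (j : Int) 0 ≠ -1 then dz
              else if dotSkip ppd (j : Int) then dz
              else dz.set ((j : Int)).toNat zl) = dz.set j zl := by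
            rw [hget]; simp [h1, hs]
          rw [hstep, ih hL' (dz.set j zl) (by simpa using hj)]
          have hset : (dz.set j zl)[j]? = some zl := List.getElem?_set_self hj
          simp [hset, hzl, hsome, h1, hs]
      · have hstep : (if PySem.List.pyGetD dz (j : Int) 0 ≠ -1 then dz
            else if dotSkip ppd (j : Int) then dz
            else dz.set ((j : Int)).toNat zl) = dz := by
          rw [hget]; simp [h1]
        rw [hstep, ih hL' dz hj]
        have hne : dz[j]? ≠ some (-1) := by rw [hsome]; simpa using h1
        simp [hne]
    · -- i ≠ j : step does not change index j
      have hkey : ∀ dz' : List Int,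
          (if PySem.List.pyGetD dz' i 0 ≠ -1 then dz'
           else if dotSkip ppd i then dz'
           else dz'.set i.toNat zl)[j]? = dz'[j]? ∧
          (if PySem.List.pyGetD dz' i 0 ≠ -1 then dz'
           else if dotSkip ppd i then dz'
           else dz'.set i.toNat zl).length = dz'.length := by
        intro dz'
        split_ifs with h1 h2
        · exact ⟨rfl, rfl⟩
        · exact ⟨rfl, rfl⟩
        · exact ⟨List.getElem?_set_ne (by omega), by simp⟩
      obtain ⟨hv, hlen⟩ := hkey dz
      rw [ih hL' _ (by rw [hlen]; exact hj), hv]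
      have hmem : ((j : Int) ∈ i :: L) ↔ ((j : Int) ∈ L) := by
        simp only [List.mem_cons]
        constructor
        · rintro (h | h)
          · exact absurd h.symm hij
          · exact h
        · exact Or.inr
      simp only [hmem]

-- A's outer loop keeps any already-assigned (≠ -1) entry
lemma outer_preserve (zs : List (Int × Int)) (hzs : ∀ p ∈ zs, 0 < p.2 ∧ p.1 ≠ -1)
    (n : Int) (dz : List Int) (j : Nat) (hj : j < dz.length)
    (v : Int) (hv : v ≠ -1) (h : dz[j]? = some v) :
    (zs.foldl (fun dz p =>
        (PySem.List.pyRange 0 n p.2).foldl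
          (fun dz i =>
            if PySem.List.pyGetD dz i 0 ≠ -1 then dz
            else if dotSkip p.2 i then dz
            else dz.set i.toNat p.1) dz) dz)[j]? = some v := by
  induction zs generalizing dz with
  | nil => simpa using h
  | cons p zs ih =>
    obtain ⟨hp2, hp1⟩ := hzs p (by simp)
    have hzs' : ∀ p ∈ zs, 0 < p.2 ∧ p.1 ≠ -1 := fun q hq => hzs q (by simp [hq])
    simp only [List.foldl_cons]
    have hLpos : ∀ i ∈ PySem.List.pyRange 0 n p.2, 0 ≤ i := by
      intro i hi
      have := (PySem.List.mem_pyRange_iff_of_pos hp2 i).mp hi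
      omega
    have hfg := fill_get p.1 p.2 hp1 _ hLpos dz j hj
    have hne : dz[j]? ≠ some (-1) := by rw [h]; simpa using hv
    rw [if_neg (by tauto)] at hfg
    exact ih hzs' _ (by rw [fill_length]; exact hj) (by rw [hfg]; exact h)

-- A's outer loop over zoom levels computes B's first-match scan at each unassigned index
lemma outer_get (zs : List (Int × Int)) (hzs : ∀ p ∈ zs, 0 < p.2 ∧ p.1 ≠ -1)
    (n : Int) (dz : List Int) (j : Nat) (hn : (dz.length : Int) = n) (hj : j < dz.length)
    (h : dz[j]? = some (-1)) :
    (zs.foldl (fun dz p =>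
        (PySem.List.pyRange 0 n p.2).foldl
          (fun dz i =>
            if PySem.List.pyGetD dz i 0 ≠ -1 then dz
            else if dotSkip p.2 i then dz
            else dz.set i.toNat p.1) dz) dz)[j]? = some (findZoom zs (j : Int)) := by
  induction zs generalizing dz with
  | nil => simpa [findZoom] using h
  | cons p zs ih =>
    obtain ⟨hp2, hp1⟩ := hzs p (by simp)
    have hzs' : ∀ q ∈ zs, 0 < q.2 ∧ q.1 ≠ -1 := fun q hq => hzs q (by simp [hq])
    simp only [List.foldl_cons]
    have hLpos : ∀ i ∈ PySem.List.pyRange 0 n p.2, 0 ≤ i := by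
      intro i hi
      have := (PySem.List.mem_pyRange_iff_of_pos hp2 i).mp hi
      omega
    have hfg := fill_get p.1 p.2 hp1 _ hLpos dz j hj
    have hflen : ∀ dz' : List Int, ((PySem.List.pyRange 0 n p.2).foldl
          (fun dz i =>
            if PySem.List.pyGetD dz i 0 ≠ -1 then dz
            else if dotSkip p.2 i then dz
            else dz.set i.toNat p.1) dz').length = dz'.length := fun dz' => fill_length _ _ _ _
    obtain ⟨zl, ppd⟩ := p
    by_cases hd : PySem.Int.mod (j : Int) ppd = 0
    · by_cases hs : dotSkip ppd (j : Int) = true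
      · -- skipped level: no write at j, recurse
        have hnot : ¬ ((j : Int) ∈ PySem.List.pyRange 0 n ppd ∧ dz[j]? = some (-1) ∧
            dotSkip ppd (j : Int) = false) := by simp [hs]
        rw [if_neg hnot] at hfg
        rw [ih hzs' _ (by rw [hflen]; exact hn) (by rw [hflen]; exact hj) (by rw [hfg]; exact h)]
        simp [findZoom, hd, hs]
      · -- matching level: write zl at j, later levels preserve it
        have hmem : (j : Int) ∈ PySem.List.pyRange 0 n ppd := by
          rw [PySem.List.mem_pyRange_iff_of_pos hp2]
          refine ⟨by omega, by omega, ?_⟩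
          simpa using (PySem.Int.mod_eq_zero_iff_dvd (j : Int) ppd).mp hd
        rw [if_pos ⟨hmem, h, by simpa using hs⟩] at hfg
        rw [outer_preserve zs hzs' n _ j (by rw [hflen]; exact hj) zl hp1 hfg]
        simp [findZoom, hd, hs]
    · -- stride does not divide j: index never visited at this level
      have hnot : ¬ ((j : Int) ∈ PySem.List.pyRange 0 n ppd ∧ dz[j]? = some (-1) ∧
          dotSkip ppd (j : Int) = false) := by
        rintro ⟨hm, -, -⟩
        have := (PySem.List.mem_pyRange_iff_of_pos hp2 (j : Int)).mp hm
        exact hd ((PySem.Int.mod_eq_zero_iff_dvd _ _).mpr (by simpa using this.2.2))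
      rw [if_neg hnot] at hfg
      rw [ih hzs' _ (by rw [hflen]; exact hn) (by rw [hflen]; exact hj) (by rw [hfg]; exact h)]
      simp [findZoom, hd]

lemma zooms_pos : ∀ p ∈ PySem.List.enumerate ZOOMS, 0 < p.2 ∧ p.1 ≠ -1 := by decide

lemma outer_length (zs : List (Int × Int)) (n : Int) (dz : List Int) :
    (zs.foldl (fun dz p =>
        (PySem.List.pyRange 0 n p.2).foldl
          (fun dz i =>
            if PySem.List.pyGetD dz i 0 ≠ -1 then dz
            else if dotSkip p.2 i then dz
            else dz.set i.toNat p.1) dz) dz).length = dz.length := by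
  induction zs generalizing dz with
  | nil => rfl
  | cons p zs ih => simp only [List.foldl_cons]; rw [ih, fill_length]

-- ===== VERDICT (by name: the statement is the Claim_ definition above) =====
theorem make_dot_zooms_spec : Claim_equal_make_dot_zooms := by
  intro dots _
  unfold Spec_make_dot_zooms make_dot_zooms make_dot_zooms_alt
  rw [PySem.List.foldl_append_singleton_eq_map, List.nil_append]
  apply List.ext_getElem?
  intro j
  by_cases hj : j < dots.length
  · rw [outer_get (PySem.List.enumerate ZOOMS) zooms_pos (dots.length : Int)
      (List.replicate dots.length (-1)) j (by simp) (by simpa using hj)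
      (by rw [List.getElem?_replicate]; simp [hj])]
    rw [List.getElem?_map, PySem.List.getElem?_pyRange_one]
    simp [hj]
  · rw [List.getElem?_eq_none (by rw [outer_length]; simp; omega),
        List.getElem?_eq_none (by simp [PySem.List.length_pyRange_one]; omega)]
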